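-- pv_equiv track=rewrite | github.com/SalmoonSake2/Project-Course-Adding-Tool | src/libs/interface/get_time_slot.py | get_time_slot
-- ===== SOURCE A (Python) =====
-- def get_time_slot(time_slot_string:str) -> list[str]:
--     '''
--     用以將陽明的時段代號處理並分割
--     '''
--     space_time_strings = time_slot_string.split(",")
--
--     result = []
--
--     for space_time_string in space_time_strings:
--
--         time_string = space_time_string.split("-")[0]
--
--         valid_day_symbols = "MTWRFSU"
--
--         cutboard = []
--         last_index = 0
--
--         for index, alphabelt in enumerate(time_string):
--             if alphabelt in valid_day_symbols and index != 0:
--                 cutboard.append(time_string[last_index:index])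
--                 last_index = index
--
--         cutboard.append(time_string[last_index:len(time_string)])
--
--         for day in cutboard:
--             day_symbol = day[0]
--             for time_slot in day[1:len(day)]:
--                 result.append(day_symbol+time_slot)
--
--     return result
-- ===== SOURCE B (Python) =====
-- def get_time_slot(time_slot_string: str) -> list[str]:
--     '''
--     Single stateful scan per comma-piece: no segment list, no nested chunk loop.
--     '''
--     result = []
--     for chunk in time_slot_string.split(","):
--         time_string = chunk.split("-")[0]
--         day_symbol = time_string[0]
--         for ch in time_string[1:]:
--             if ch in "MTWRFSU":
--                 day_symbol = ch
--             else:
--                 result.append(day_symbol + ch)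
--     return result
-- ===== Notes on version B (the rewrite author's own statement) =====
-- stated objective: simpler
-- what changed: Replaces A's two-phase per-chunk work (an enumerate loop that builds a 'cutboard' list of slice segments, then a nested loop flattening each segment into pairs) with one stateful linear scan that keeps the current day symbol and emits pairs directly, so the intermediate segment list and the nested loop disappear.
import Mathlib
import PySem

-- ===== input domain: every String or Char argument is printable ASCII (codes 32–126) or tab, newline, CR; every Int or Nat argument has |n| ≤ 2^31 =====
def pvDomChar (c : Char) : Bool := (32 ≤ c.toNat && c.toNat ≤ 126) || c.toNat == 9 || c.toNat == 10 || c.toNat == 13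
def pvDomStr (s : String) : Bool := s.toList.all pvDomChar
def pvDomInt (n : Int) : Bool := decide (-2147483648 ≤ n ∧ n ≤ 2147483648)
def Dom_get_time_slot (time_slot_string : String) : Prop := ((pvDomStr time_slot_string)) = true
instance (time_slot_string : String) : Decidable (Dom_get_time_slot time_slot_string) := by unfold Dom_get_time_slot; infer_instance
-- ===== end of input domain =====

-- B replaces A's per-chunk "build a cutboard of slice segments, then flatten it" two-phase loop
-- by a single stateful scan carrying the current day symbol (objective: simpler).

-- ===== PORT A =====
-- 'MTWRFSU' (the membership test 'alphabelt in "MTWRFSU"' on a single char is char membership)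
def gtsValid : List Char := "MTWRFSU".toList

-- A's inner enumerate-loop body: state (cutboard, last_index)
def gtsStepA (ts : List Char) (p : List (List Char) × Int) (iv : Int × Char) :
    List (List Char) × Int :=
  if iv.2 ∈ gtsValid ∧ iv.1 ≠ 0 then
    (p.1 ++ [PySem.List.slice ts (some p.2) (some iv.1)], iv.1)
  else p

-- A's 'for day in cutboard' body: day[0] raises IndexError on an empty day (excluded by Pre_)
def gtsFlatDay (acc : List String) (day : List Char) : List String :=
  match PySem.List.pyGet? day 0 with
  | none => acc
  | some d =>
    (PySem.List.slice day (some 1) (some (PySem.List.len day))).foldl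
      (fun r c => r ++ [String.ofList [d, c]]) acc

-- A's outer loop body for one comma chunk; split('-') is never empty, so [0] is headD
def gtsChunkA (acc : List String) (chunk : List Char) : List String :=
  let ts := (PySem.Chars.splitOn chunk ['-']).headD []
  let st := (PySem.List.enumerate ts).foldl (gtsStepA ts) ([], 0)
  let cutboard := st.1 ++ [PySem.List.slice ts (some st.2) (some (PySem.List.len ts))]
  cutboard.foldl gtsFlatDay acc

def get_time_slot (time_slot_string : String) : List String :=
  (PySem.Chars.splitOn time_slot_string.toList [',']).foldl gtsChunkA []

-- ===== PORT B =====
-- B's scan body: state (day_symbol, result)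
def gtsStepB (st : Char × List String) (c : Char) : Char × List String :=
  if c ∈ gtsValid then (c, st.2) else (st.1, st.2 ++ [String.ofList [st.1, c]])

-- B's loop body for one comma chunk; time_string[0] raises IndexError on [] (excluded by Pre_)
def gtsChunkB (acc : List String) (chunk : List Char) : List String :=
  match (PySem.Chars.splitOn chunk ['-']).headD [] with
  | [] => acc
  | d :: rest => (rest.foldl gtsStepB (d, acc)).2

def get_time_slot_alt (time_slot_string : String) : List String :=
  (PySem.Chars.splitOn time_slot_string.toList [',']).foldl gtsChunkB []

-- ===== PRECONDITION & SPEC =====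
-- A (and B) raise IndexError exactly when some comma chunk's part before '-' is empty
-- (day[0] resp. time_string[0] on the empty string); Pre_ excludes exactly those inputs.
def Pre_get_time_slot (time_slot_string : String) : Prop :=
  ∀ chunk ∈ PySem.Chars.splitOn time_slot_string.toList [','],
    (PySem.Chars.splitOn chunk ['-']).headD [] ≠ []

instance (time_slot_string : String) : Decidable (Pre_get_time_slot time_slot_string) := by
  unfold Pre_get_time_slot; infer_instance

def pvWitness_get_time_slot : String := "M12,W34-ab"

def Spec_get_time_slot (time_slot_string : String) (out : List String) : Prop :=
  out = get_time_slot_alt time_slot_string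

instance (time_slot_string : String) (out : List String) :
    Decidable (Spec_get_time_slot time_slot_string out) := by
  unfold Spec_get_time_slot; infer_instance

-- ===== CLAIM (what is proved, stated in full; the proofs are below) =====
def Claim_equal_get_time_slot : Prop :=
  ∀ (time_slot_string : String), Dom_get_time_slot time_slot_string →
    Pre_get_time_slot time_slot_string →
    Spec_get_time_slot time_slot_string (get_time_slot time_slot_string)

-- ===== LEMMAS AND PROOFS =====

-- the pairs both programs emit for one time_string d :: rest
def gtsPairs (d : Char) : List Char → List String
  | [] => []
  | c :: cs => if c ∈ gtsValid then gtsPairs c cs else String.ofList [d, c] :: gtsPairs d cs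

theorem gtsB_fold (rest : List Char) : ∀ (d : Char) (acc : List String),
    (rest.foldl gtsStepB (d, acc)).2 = acc ++ gtsPairs d rest := by
  induction rest with
  | nil => intro d acc; simp [gtsPairs]
  | cons c cs ih =>
    intro d acc
    by_cases h : c ∈ gtsValid
    · simp [gtsStepB, h, gtsPairs, ih]
    · simp [gtsStepB, h, gtsPairs, ih]

theorem gtsPairs_append (seg : List Char) (h : ∀ c ∈ seg, c ∉ gtsValid)
    (d : Char) (rest : List Char) :
    gtsPairs d (seg ++ rest)
      = seg.map (fun c => String.ofList [d, c]) ++ gtsPairs d rest := by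
  induction seg with
  | nil => simp
  | cons c cs ih =>
    have hc : c ∉ gtsValid := h c (by simp)
    simp [gtsPairs, hc, ih (fun x hx => h x (by simp [hx]))]

theorem gtsFlatDay_cons (acc : List String) (d : Char) (cs : List Char) :
    gtsFlatDay acc (d :: cs) = acc ++ cs.map (fun c => String.ofList [d, c]) := by
  have hs : PySem.List.slice (d :: cs) (some 1) (some ((cs.length : Int) + 1)) = cs := by
    rw [show ((cs.length : Int) + 1) = ((cs.length + 1 : Nat) : Int) by push_cast; ring,
        show (1 : Int) = ((1 : Nat) : Int) by norm_num, PySem.List.slice_natCast]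
    simp
  simp [gtsFlatDay, hs]
  rw [← List.flatMap_def]
  exact Eq.symm List.map_eq_flatMap

-- the main invariant of A's enumerate loop
theorem gtsA_main (future : List Char) :
    ∀ (ts : List Char) (k last : Nat) (cb : List (List Char)) (acc : List String)
      (d : Char) (seg : List Char),
    ts.drop k = future → last ≤ k → k ≤ ts.length → 1 ≤ k →
    PySem.List.slice ts (some (last : Int)) (some (k : Int)) = d :: seg →
    (∀ c ∈ seg, c ∉ gtsValid) →
    (let st := (PySem.List.enumerate future (k : Int)).foldl (gtsStepA ts) (cb, (last : Int));
     (st.1 ++ [PySem.List.slice ts (some st.2) (some (PySem.List.len ts))]).foldl gtsFlatDay acc)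
      = cb.foldl gtsFlatDay acc ++ gtsPairs d (seg ++ future) := by
  induction future with
  | nil =>
    intro ts k last cb acc d seg hdrop hlk hkl hk1 hslice hseg
    have hk : k = ts.length := by
      have := congrArg List.length hdrop
      simp [List.length_drop] at this
      omega
    have hmap := gtsPairs_append seg hseg d []
    simp only [List.append_nil, gtsPairs] at hmap
    simp only [PySem.List.enumerate_nil, List.foldl_nil]
    rw [PySem.List.len_eq, ← hk, List.foldl_append]
    simp [hslice, gtsFlatDay_cons, hmap]
  | cons c fut ih =>
    intro ts k last cb acc d seg hdrop hlk hkl hk1 hslice hseg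
    have hk0 : ¬ k = 0 := by omega
    have hkne : (k : Int) ≠ 0 := by exact_mod_cast hk0
    have hdrop' : ts.drop (k + 1) = fut := by
      have : ts.drop (k+1) = (ts.drop k).drop 1 := by
        rw [List.drop_drop]
      simp [this, hdrop]
    have hkl' : k + 1 ≤ ts.length := by
      have := congrArg List.length hdrop
      simp [List.length_drop] at this
      omega
    have htk : ts[k]? = some c := by
      have : (ts.drop k)[0]? = ts[k + 0]? := List.getElem?_drop
      simpa [hdrop] using this.symm
    rw [PySem.List.enumerate_cons]
    by_cases hc : c ∈ gtsValid
    · -- cut: new segment [c] starting at k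
      have hstep : gtsStepA ts (cb, (last : Int)) ((k : Int), c)
          = (cb ++ [d :: seg], (k : Int)) := by
        simp [gtsStepA, hc, hk0, hslice]
      have hsl : PySem.List.slice ts (some (k : Int)) (some ((k : Int) + 1)) = [c] := by
        have h1 : ((k : Int) + 1) = ((k + 1 : Nat) : Int) := by push_cast; ring
        rw [h1, PySem.List.slice_natCast]
        simp [hdrop]
      have := ih ts (k + 1) k (cb ++ [d :: seg]) acc c []
        hdrop' (by omega) hkl' (by omega)
        (by rw [show ((k + 1 : Nat) : Int) = ((k : Int) + 1) by push_cast; ring]; exact hsl)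
        (by simp)
      simp only [List.foldl_cons, hstep,
        show ((k : Int) + 1) = ((k + 1 : Nat) : Int) by push_cast; ring] at *
      rw [this, List.foldl_append]
      simp [gtsFlatDay_cons, gtsPairs_append seg hseg, gtsPairs, hc]
    · -- no cut: current segment grows by c
      have hstep : gtsStepA ts (cb, (last : Int)) ((k : Int), c) = (cb, (last : Int)) := by
        simp [gtsStepA, hc]
      have hslice' : PySem.List.slice ts (some (last : Int)) (some ((k + 1 : Nat) : Int))
          = d :: (seg ++ [c]) := by
        rw [PySem.List.slice_natCast] at hslice ⊢
        have h1 : k + 1 - last = (k - last) + 1 := by omega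
        rw [h1, List.take_add_one, hslice]
        have : (ts.drop last)[k - last]? = ts[last + (k - last)]? := List.getElem?_drop
        rw [this, show last + (k - last) = k by omega, htk]
        simp
      have := ih ts (k + 1) last cb acc d (seg ++ [c])
        hdrop' (by omega) hkl' (by omega) hslice'
        (by intro x hx; rcases List.mem_append.1 hx with h | h
            · exact hseg x h
            · simp at h; subst h; exact hc)
      simp only [List.foldl_cons, hstep,
        show ((k : Int) + 1) = ((k + 1 : Nat) : Int) by push_cast; ring] at *
      rw [this]
      simp
  
theorem gtsChunk_eq (acc : List String) (chunk : List Char)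
    (h : (PySem.Chars.splitOn chunk ['-']).headD [] ≠ []) :
    gtsChunkA acc chunk = gtsChunkB acc chunk := by
  unfold gtsChunkA gtsChunkB
  cases hts : (PySem.Chars.splitOn chunk ['-']).headD [] with
  | nil => exact absurd hts h
  | cons d rest =>
    dsimp only
    have hfirst : gtsStepA (d :: rest) (([] : List (List Char)), (0 : Int)) ((0 : Int), d)
        = ([], 0) := by simp [gtsStepA]
    have hmain := gtsA_main rest (d :: rest) 1 0 [] acc d []
      (by simp) (by omega) (by simp) (by omega)
      (by rw [show ((0:Nat) : Int) = 0 by norm_num, show ((1:Nat) : Int) = 1 by norm_num]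
          simp [PySem.List.slice])
      (by simp)
    rw [PySem.List.enumerate_cons]
    simp only [List.foldl_cons, hfirst]
    rw [show (0 : Int) + 1 = ((1 : Nat) : Int) by norm_num,
        show (0 : Int) = ((0 : Nat) : Int) by norm_num] at *
    rw [hmain]
    simp [gtsB_fold]

-- ===== VERDICT (by name: the statement is the Claim_ definition above) =====
theorem get_time_slot_spec : Claim_equal_get_time_slot := by
  intro s _ hpre
  unfold Spec_get_time_slot get_time_slot get_time_slot_alt
  exact PySem.List.foldl_congr_mem _ _ _ _
    (fun acc chunk hmem => gtsChunk_eq acc chunk (hpre chunk hmem))
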